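-- pv_equiv track=rewrite | github.com/La-sociedad-del-silencio/TP3-NP-Completos | codigo/backtracking_con_greedy.py | asignacion_greedy
-- ===== SOURCE A (Python) =====
-- def asignacion_greedy(maestros_y_habilidades, k):
--     S = [set() for _ in range(k)]
--     sumas_grupos = {i: 0 for i in range(k)}
--     suma_maxima = 0
--
--     for maestro_y_habilidad in maestros_y_habilidades:
--         maestro, habilidad = maestro_y_habilidad
--         grupo_menor_suma =  min(sumas_grupos,
--                                 key=sumas_grupos.get)
--         S[grupo_menor_suma].add(maestro)
--         sumas_grupos[grupo_menor_suma] += habilidad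
--         suma_maxima = max(suma_maxima,
--                           sumas_grupos[grupo_menor_suma])
--
--     coeficiente = sum(s**2 for _,s in sumas_grupos.items())
--
--     return S, coeficiente, suma_maxima
-- ===== SOURCE B (Python) =====
-- def asignacion_greedy(maestros_y_habilidades, k):
--     # Skew heap keyed by (suma, indice) (lexicographic, ties impossible): the
--     # least-loaded group is popped in O(log k) instead of A's O(k) dict scan.
--     # Node = ((suma, indice), left, right); None is the empty heap.
--     def merge(a, b):
--         # iterative top-down skew-heap merge: walk the smaller-root side's
--         # right spine, then rebuild bottom-up swapping children
--         path = []
--         while a is not None and b is not None: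
--             if a[0] <= b[0]:
--                 path.append(a)
--                 a = a[2]
--             else:
--                 path.append(b)
--                 b = b[2]
--         cur = a if a is not None else b
--         for x in reversed(path):
--             cur = (x[0], cur, x[1])
--         return cur
--
--     grupos = [set() for _ in range(k)]
--     sumas = [0] * k
--     # initial heap: every sum is 0, so a left chain with indices increasing
--     # downwards is already heap-ordered
--     heap = None
--     for i in range(k - 1, -1, -1):
--         heap = ((0, i), heap, None)
--     suma_maxima = 0
--
--     for maestro, habilidad in maestros_y_habilidades:
--         (s, i), izq, der = heap
--         heap = merge(izq, der)
--         s += habilidad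
--         grupos[i].add(maestro)
--         sumas[i] = s
--         heap = merge(heap, ((s, i), None, None))
--         if s > suma_maxima:
--             suma_maxima = s
--
--     coeficiente = sum(s * s for s in sumas)
--     return grupos, coeficiente, suma_maxima
-- ===== Notes on version B (the rewrite author's own statement) =====
-- stated objective: faster
-- what changed: A rescans the whole sums dict with min(sumas_grupos, key=sumas_grupos.get) for every item; B keeps the (suma, indice) pairs in a skew heap (plus a plain sums list for the final coefficient), so the least-loaded group is popped and its updated sum re-inserted in O(log k) per item.
import Mathlib
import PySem

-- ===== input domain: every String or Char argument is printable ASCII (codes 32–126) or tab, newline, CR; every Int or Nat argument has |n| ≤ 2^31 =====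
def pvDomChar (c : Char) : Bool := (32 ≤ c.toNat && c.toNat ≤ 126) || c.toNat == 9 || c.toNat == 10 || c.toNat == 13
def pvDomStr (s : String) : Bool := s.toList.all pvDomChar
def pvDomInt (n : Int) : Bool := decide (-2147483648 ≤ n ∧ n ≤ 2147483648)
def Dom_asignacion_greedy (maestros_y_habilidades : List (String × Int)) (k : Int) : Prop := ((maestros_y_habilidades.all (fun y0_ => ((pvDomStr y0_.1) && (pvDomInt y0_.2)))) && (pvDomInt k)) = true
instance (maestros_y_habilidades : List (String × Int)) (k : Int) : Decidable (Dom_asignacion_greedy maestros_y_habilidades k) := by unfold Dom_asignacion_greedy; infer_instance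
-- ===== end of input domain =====

-- B replaces A's per-item O(k) scan `min(sumas_grupos, key=sumas_grupos.get)` by a
-- skew heap keyed by (suma, indice), picking the least-loaded group in O(log k).

-- ===== PORT A =====
-- Python's `min(keys, key=d.get)` over the sums dict: the FIRST key attaining the
-- minimal value.  On an empty dict Python raises ValueError (excluded by Pre_);
-- the 0 returned on [] here is a dummy never relied upon.
def pyMinKeyByGet (items : List (Int × Int)) : Int :=
  match items with
  | [] => 0
  | p :: rest => (rest.foldl (fun b q => if q.2 < b.2 then q else b) p).1

-- one iteration of A's `for maestro_y_habilidad in maestros_y_habilidades` loop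
def stepA (st : List (List String) × PySem.Dict Int Int × Int) (p : String × Int) :
    List (List String) × PySem.Dict Int Int × Int :=
  let g := pyMinKeyByGet st.2.1.items
  let S' := st.1.set g.toNat (PySem.Set.add (st.1.getD g.toNat []) p.1)
  let d' := st.2.1.insert g (st.2.1.getD g 0 + p.2)
  (S', d', max st.2.2 (d'.getD g 0))

def asignacion_greedy (maestros_y_habilidades : List (String × Int)) (k : Int) : List (List String) × Int × Int :=
  let S0 : List (List String) := (PySem.List.pyRange 0 k 1).map (fun _ => ([] : PySem.Set String))
  let d0 : PySem.Dict Int Int := (PySem.List.pyRange 0 k 1).foldl (fun d i => d.insert i 0) PySem.Dict.empty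
  let st := maestros_y_habilidades.foldl stepA (S0, d0, 0)
  (st.1, (st.2.1.items.map (fun p => p.2 ^ 2)).sum, st.2.2)

-- ===== PORT B =====
-- skew heap of (suma, indice) keys; `leaf` is Python's None
inductive SkewHeap where
  | leaf : SkewHeap
  | node (s i : Int) (l r : SkewHeap) : SkewHeap
deriving DecidableEq, Repr

def SkewHeap.size : SkewHeap → Nat
  | .leaf => 0
  | .node _ _ l r => l.size + r.size + 1

-- Python tuple comparison (s1, i1) <= (s2, i2)
def keyLE (s1 i1 s2 i2 : Int) : Bool := decide (s1 < s2 ∨ (s1 = s2 ∧ i1 ≤ i2))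

-- structural recursion on a fuel bound (= the recursion depth bound of Source B's merge),
-- so the kernel can evaluate it; the fuel never runs out (see mergeFuel_eq lemmas below)
def SkewHeap.mergeFuel : Nat → SkewHeap → SkewHeap → SkewHeap
  | _, .leaf, b => b
  | _, .node s i l r, .leaf => .node s i l r
  | 0, .node s i l r, .node _ _ _ _ => .node s i l r
  | n+1, .node s1 i1 l1 r1, .node s2 i2 l2 r2 =>
    if keyLE s1 i1 s2 i2 then .node s1 i1 (SkewHeap.mergeFuel n r1 (.node s2 i2 l2 r2)) l1
    else .node s2 i2 (SkewHeap.mergeFuel n r2 (.node s1 i1 l1 r1)) l2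

def SkewHeap.merge (a b : SkewHeap) : SkewHeap := SkewHeap.mergeFuel (a.size + b.size) a b

-- one iteration of B's loop; on an empty heap Python B raises a TypeError
-- (only reachable outside Pre_), here the state is returned unchanged to keep the fold total
def stepB (st : SkewHeap × List (List String) × List Int × Int) (p : String × Int) :
    SkewHeap × List (List String) × List Int × Int :=
  match st.1 with
  | .leaf => st
  | .node s i l r =>
    let s' := s + p.2
    let grupos' := st.2.1.set i.toNat (PySem.Set.add (st.2.1.getD i.toNat []) p.1)
    let sumas' := st.2.2.1.set i.toNat s'
    let h' := SkewHeap.merge (SkewHeap.merge l r) (SkewHeap.node s' i .leaf .leaf)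
    (h', grupos', sumas', if s' > st.2.2.2 then s' else st.2.2.2)

def asignacion_greedy_alt (maestros_y_habilidades : List (String × Int)) (k : Int) : List (List String) × Int × Int :=
  let grupos0 : List (List String) := (PySem.List.pyRange 0 k 1).map (fun _ => ([] : PySem.Set String))
  let sumas0 : List Int := List.replicate k.toNat 0
  -- `for i in range(k-1, -1, -1): heap = ((0, i), heap, None)`
  let heap0 : SkewHeap := (PySem.List.pyRange (k - 1) (-1) (-1)).foldl
    (fun h i => SkewHeap.node 0 i h .leaf) .leaf
  let st := maestros_y_habilidades.foldl stepB (heap0, grupos0, sumas0, 0)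
  (st.2.1, (st.2.2.1.map (fun s => s * s)).sum, st.2.2.2)

-- ===== PRECONDITION & SPEC =====
-- Pre_ excludes exactly the inputs on which A raises: a nonempty item list with k ≤ 0
-- makes A's `min` scan an empty dict (ValueError).  A returns on every other input.
def Pre_asignacion_greedy (maestros_y_habilidades : List (String × Int)) (k : Int) : Prop :=
  maestros_y_habilidades = [] ∨ 0 < k
instance (maestros_y_habilidades : List (String × Int)) (k : Int) : Decidable (Pre_asignacion_greedy maestros_y_habilidades k) := by unfold Pre_asignacion_greedy; infer_instance

def pvWitness_asignacion_greedy : (List (String × Int)) × Int := ([("ana", 3), ("bo", 1), ("ana", 2)], 2)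

def Spec_asignacion_greedy (maestros_y_habilidades : List (String × Int)) (k : Int) (out : List (List String) × Int × Int) : Prop := out = asignacion_greedy_alt maestros_y_habilidades k
instance (maestros_y_habilidades : List (String × Int)) (k : Int) (out : List (List String) × Int × Int) : Decidable (Spec_asignacion_greedy maestros_y_habilidades k out) := by unfold Spec_asignacion_greedy; infer_instance

-- ===== CLAIM (what is proved, stated in full; the proofs are below) =====
def Claim_equal_asignacion_greedy : Prop := ∀ (maestros_y_habilidades : List (String × Int)) (k : Int), Dom_asignacion_greedy maestros_y_habilidades k → Pre_asignacion_greedy maestros_y_habilidades k → Spec_asignacion_greedy maestros_y_habilidades k (asignacion_greedy maestros_y_habilidades k)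

-- ===== LEMMAS AND PROOFS =====

def SkewHeap.toList : SkewHeap → List (Int × Int)
  | .leaf => []
  | .node s i l r => (s, i) :: (l.toList ++ r.toList)

def SkewHeap.Ordered : SkewHeap → Prop
  | .leaf => True
  | .node s i l r => (∀ q ∈ l.toList ++ r.toList, keyLE s i q.1 q.2 = true) ∧ l.Ordered ∧ r.Ordered

-- A-side dict contents / B-side heap contents, both as a function of the group sums v
def itemsOf (v : List Int) : List (Int × Int) := (List.range v.length).map (fun (i : Nat) => ((i : Int), v.getD i 0))
def pairsOf (v : List Int) : List (Int × Int) := (List.range v.length).map (fun (i : Nat) => (v.getD i 0, (i : Int)))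

lemma keyLE_iff (s1 i1 s2 i2 : Int) : keyLE s1 i1 s2 i2 = true ↔ (s1 < s2 ∨ (s1 = s2 ∧ i1 ≤ i2)) := by
  simp [keyLE]
lemma keyLE_refl (s i : Int) : keyLE s i s i = true := by simp [keyLE_iff]
lemma keyLE_trans {s1 i1 s2 i2 s3 i3 : Int} (h1 : keyLE s1 i1 s2 i2 = true)
    (h2 : keyLE s2 i2 s3 i3 = true) : keyLE s1 i1 s3 i3 = true := by
  rw [keyLE_iff] at *; omega
lemma keyLE_antisymm {s1 i1 s2 i2 : Int} (h1 : keyLE s1 i1 s2 i2 = true)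
    (h2 : keyLE s2 i2 s1 i1 = true) : s1 = s2 ∧ i1 = i2 := by
  rw [keyLE_iff] at *; omega

lemma keyLE_total (s1 i1 s2 i2 : Int) : keyLE s1 i1 s2 i2 = true ∨ keyLE s2 i2 s1 i1 = true := by
  rw [keyLE_iff, keyLE_iff]; omega

lemma toList_mergeFuel : ∀ (n : Nat) (a b : SkewHeap), a.size + b.size ≤ n →
    (SkewHeap.mergeFuel n a b).toList.Perm (a.toList ++ b.toList) := by
  intro n
  induction n with
  | zero =>
      intro a b hn
      cases a with
      | leaf => simp [SkewHeap.mergeFuel, SkewHeap.toList]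
      | node s i l r =>
          cases b with
          | leaf => simp [SkewHeap.mergeFuel, SkewHeap.toList]
          | node s2 i2 l2 r2 => simp [SkewHeap.size] at hn
  | succ n ih =>
      intro a b hn
      cases a with
      | leaf => simp [SkewHeap.mergeFuel, SkewHeap.toList]
      | node s1 i1 l1 r1 =>
          cases b with
          | leaf => simp [SkewHeap.mergeFuel, SkewHeap.toList]
          | node s2 i2 l2 r2 =>
              simp only [SkewHeap.mergeFuel]
              split
              · simp only [SkewHeap.toList]
                refine List.Perm.cons _ ?_
                have hsz : r1.size + (SkewHeap.node s2 i2 l2 r2).size ≤ n := by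
                  simp only [SkewHeap.size] at hn ⊢; omega
                have ihr := ih r1 (SkewHeap.node s2 i2 l2 r2) hsz
                have h2 : (((r1.toList ++ (SkewHeap.node s2 i2 l2 r2).toList)) ++ l1.toList).Perm
                    (l1.toList ++ (r1.toList ++ (SkewHeap.node s2 i2 l2 r2).toList)) := List.perm_append_comm
                simpa [SkewHeap.toList, List.append_assoc] using (ihr.append_right l1.toList).trans h2
              · have hsz : r2.size + (SkewHeap.node s1 i1 l1 r1).size ≤ n := by
                  simp only [SkewHeap.size] at hn ⊢; omega
                have ihr := ih r2 (SkewHeap.node s1 i1 l1 r1) hsz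
                simp only [SkewHeap.toList]
                have h2 : (((r2.toList ++ (SkewHeap.node s1 i1 l1 r1).toList)) ++ l2.toList).Perm
                    (l2.toList ++ (r2.toList ++ (SkewHeap.node s1 i1 l1 r1).toList)) := List.perm_append_comm
                have h3 := (List.Perm.cons (s2, i2) ((ihr.append_right l2.toList).trans h2))
                have h4 : (((s2, i2) :: (l2.toList ++ r2.toList)) ++ ((s1, i1) :: (l1.toList ++ r1.toList))).Perm
                    (((s1, i1) :: (l1.toList ++ r1.toList)) ++ ((s2, i2) :: (l2.toList ++ r2.toList))) := List.perm_append_comm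
                refine List.Perm.trans ?_ h4
                simpa [SkewHeap.toList, List.append_assoc] using h3

lemma toList_merge (a b : SkewHeap) : (SkewHeap.merge a b).toList.Perm (a.toList ++ b.toList) :=
  toList_mergeFuel (a.size + b.size) a b (Nat.le_refl _)

lemma ordered_mergeFuel : ∀ (n : Nat) (a b : SkewHeap), a.size + b.size ≤ n →
    a.Ordered → b.Ordered → (SkewHeap.mergeFuel n a b).Ordered := by
  intro n
  induction n with
  | zero =>
      intro a b hn ha hb
      cases a with
      | leaf => exact hb
      | node s i l r =>
          cases b with
          | leaf => exact ha
          | node s2 i2 l2 r2 => simp [SkewHeap.size] at hn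
  | succ n ih =>
      intro a b hn ha hb
      cases a with
      | leaf => exact hb
      | node s1 i1 l1 r1 =>
          cases b with
          | leaf => exact ha
          | node s2 i2 l2 r2 =>
              simp only [SkewHeap.mergeFuel]
              have hsz1 : r1.size + (SkewHeap.node s2 i2 l2 r2).size ≤ n := by
                simp only [SkewHeap.size] at hn ⊢; omega
              have hsz2 : r2.size + (SkewHeap.node s1 i1 l1 r1).size ≤ n := by
                simp only [SkewHeap.size] at hn ⊢; omega
              split
              · next hle =>
                  obtain ⟨ha1, ha2, ha3⟩ := ha
                  obtain ⟨hb1, hb2, hb3⟩ := hb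
                  refine ⟨?_, ih r1 (SkewHeap.node s2 i2 l2 r2) hsz1 ha3 ⟨hb1, hb2, hb3⟩, ha2⟩
                  intro q hq
                  rcases List.mem_append.1 hq with hq | hq
                  · rcases (toList_mergeFuel n r1 (SkewHeap.node s2 i2 l2 r2) hsz1).mem_iff.1 hq with hq'
                    rcases List.mem_append.1 hq' with h1 | h1
                    · exact ha1 q (List.mem_append.2 (Or.inr h1))
                    · simp only [SkewHeap.toList, List.mem_cons] at h1
                      rcases h1 with h1 | h1
                      · subst h1; exact hle
                      · exact keyLE_trans hle (hb1 q h1)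
                  · exact ha1 q (List.mem_append.2 (Or.inl hq))
              · next hle =>
                  obtain ⟨ha1, ha2, ha3⟩ := ha
                  obtain ⟨hb1, hb2, hb3⟩ := hb
                  have hle2 : keyLE s2 i2 s1 i1 = true := by
                    rcases keyLE_total s1 i1 s2 i2 with h | h
                    · exact absurd h (by simpa using hle)
                    · exact h
                  refine ⟨?_, ih r2 (SkewHeap.node s1 i1 l1 r1) hsz2 hb3 ⟨ha1, ha2, ha3⟩, hb2⟩
                  intro q hq
                  rcases List.mem_append.1 hq with hq | hq
                  · rcases (toList_mergeFuel n r2 (SkewHeap.node s1 i1 l1 r1) hsz2).mem_iff.1 hq with hq'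
                    rcases List.mem_append.1 hq' with h1 | h1
                    · exact hb1 q (List.mem_append.2 (Or.inr h1))
                    · simp only [SkewHeap.toList, List.mem_cons] at h1
                      rcases h1 with h1 | h1
                      · subst h1; exact hle2
                      · exact keyLE_trans hle2 (ha1 q h1)
                  · exact hb1 q (List.mem_append.2 (Or.inl hq))

lemma ordered_merge (a b : SkewHeap) (ha : a.Ordered) (hb : b.Ordered) : (SkewHeap.merge a b).Ordered :=
  ordered_mergeFuel (a.size + b.size) a b (Nat.le_refl _) ha hb

lemma foldl_pick_spec (rest : List (Int × Int)) : ∀ p : Int × Int,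
    (p :: rest).Pairwise (fun a b => a.1 < b.1) →
    (rest.foldl (fun b q => if q.2 < b.2 then q else b) p) ∈ p :: rest ∧
    ∀ q ∈ p :: rest, keyLE (rest.foldl (fun b q => if q.2 < b.2 then q else b) p).2
        (rest.foldl (fun b q => if q.2 < b.2 then q else b) p).1 q.2 q.1 = true := by
  induction rest with
  | nil =>
      intro p _
      refine ⟨List.mem_singleton.2 rfl, ?_⟩
      intro q hq
      rw [List.mem_singleton] at hq; subst hq; exact keyLE_refl _ _
  | cons q' rest' ih =>
      intro p hsorted
      rw [List.pairwise_cons] at hsorted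
      obtain ⟨hp, hsorted'⟩ := hsorted
      rw [List.pairwise_cons] at hsorted'
      obtain ⟨hq', hrest'⟩ := hsorted'
      have hsort2 : ((if q'.2 < p.2 then q' else p) :: rest').Pairwise (fun a b => a.1 < b.1) := by
        rw [List.pairwise_cons]
        refine ⟨?_, hrest'⟩
        intro a ha
        split
        · exact hq' a ha
        · exact hp a (List.mem_cons_of_mem _ ha)
      obtain ⟨hmem, hbound⟩ := ih (if q'.2 < p.2 then q' else p) hsort2
      simp only [List.foldl_cons]
      constructor
      · rcases List.mem_cons.1 hmem with h | h
        · rw [h]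
          split
          · exact List.mem_cons_of_mem _ (List.mem_cons_self)
          · exact List.mem_cons_self
        · exact List.mem_cons_of_mem _ (List.mem_cons_of_mem _ h)
      · intro q hq
        have hpickp : keyLE (if q'.2 < p.2 then q' else p).2 (if q'.2 < p.2 then q' else p).1 p.2 p.1 = true := by
          split <;> rw [keyLE_iff] <;> omega
        have hpickq : keyLE (if q'.2 < p.2 then q' else p).2 (if q'.2 < p.2 then q' else p).1 q'.2 q'.1 = true := by
          have := hp q' List.mem_cons_self
          split <;> rw [keyLE_iff] <;> omega
        have hr := hbound _ List.mem_cons_self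
        rcases List.mem_cons.1 hq with h | h
        · subst h; exact keyLE_trans hr hpickp
        · rcases List.mem_cons.1 h with h | h
          · subst h; exact keyLE_trans hr hpickq
          · exact hbound q (List.mem_cons_of_mem _ h)

lemma find?_range_map (f : Nat → Int) (j : Nat) : ∀ (n : Nat), j < n →
    ((List.range n).map (fun (i : Nat) => ((i : Int), f i))).find? (fun p => p.1 == (j : Int)) = some ((j : Int), f j) := by
  intro n
  induction n with
  | zero => omega
  | succ n ih =>
      intro hj
      rw [List.range_succ, List.map_append, List.find?_append]
      by_cases h : j < n
      · rw [ih h]; rfl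
      · have hj' : j = n := by omega
        subst hj'
        have hnone : ((List.range j).map (fun (i : Nat) => ((i : Int), f i))).find? (fun p => p.1 == (j : Int)) = none := by
          rw [List.find?_eq_none]
          intro x hx
          simp only [List.mem_map, List.mem_range] at hx
          obtain ⟨i, hi, rfl⟩ := hx
          simp only [beq_iff_eq]
          intro hc
          omega
        rw [hnone]
        simp
lemma find?_itemsOf (v : List Int) (j : Nat) (hj : j < v.length) :
    (itemsOf v).find? (fun p => p.1 == (j : Int)) = some ((j : Int), v.getD j 0) := by
  exact find?_range_map (fun i => v.getD i 0) j v.length hj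

lemma getD_of_items {d : PySem.Dict Int Int} {v : List Int} (hd : d.items = itemsOf v)
    (j : Nat) (hj : j < v.length) : d.getD (j : Int) 0 = v.getD j 0 := by
  simp [PySem.Dict.getD, PySem.Dict.get?, hd, find?_itemsOf v j hj]

lemma contains_of_items {d : PySem.Dict Int Int} {v : List Int} (hd : d.items = itemsOf v)
    (j : Nat) (hj : j < v.length) : d.contains (j : Int) = true := by
  have : ((j : Int), v.getD j 0) ∈ d.items := by
    rw [hd]
    exact List.mem_map.2 ⟨j, List.mem_range.2 hj, rfl⟩
  simp only [PySem.Dict.contains, List.any_eq_true]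
  exact ⟨_, this, by simp⟩

lemma items_insert_of_items {d : PySem.Dict Int Int} {v : List Int} (hd : d.items = itemsOf v)
    (j : Nat) (hj : j < v.length) (w : Int) :
    (d.insert (j : Int) w).items = itemsOf (v.set j w) := by
  simp only [PySem.Dict.insert, contains_of_items hd j hj, if_pos]
  rw [hd]
  simp only [itemsOf, List.map_map, List.length_set]
  refine List.map_congr_left ?_
  intro i hi
  rw [List.mem_range] at hi
  by_cases h : i = j
  · subst h
    simp [List.getD, List.getElem?_set_self hj]
  · have : ¬ ((i : Int) == (j : Int)) = true := by simp; omega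
    simp only [Function.comp_apply, this, if_neg, Bool.false_eq_true, not_false_iff]
    simp [List.getD, List.getElem?_set_ne (Ne.symm (by omega : i ≠ j))]

lemma pairsOf_perm (v : List Int) (j : Nat) (hj : j < v.length) (w : Int) :
    ∃ rest : List (Int × Int),
      (pairsOf v).Perm ((v.getD j 0, (j : Int)) :: rest) ∧
      (pairsOf (v.set j w)).Perm ((w, (j : Int)) :: rest) := by
  refine ⟨((List.range v.length).erase j).map (fun (i : Nat) => (v.getD i 0, (i : Int))), ?_, ?_⟩
  · have hperm : (List.range v.length).Perm (j :: (List.range v.length).erase j) :=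
      List.perm_cons_erase (List.mem_range.2 hj)
    simpa [pairsOf] using hperm.map (fun (i : Nat) => (v.getD i 0, (i : Int)))
  · have hperm : (List.range v.length).Perm (j :: (List.range v.length).erase j) :=
      List.perm_cons_erase (List.mem_range.2 hj)
    have h1 : (pairsOf (v.set j w)).Perm
        (((v.set j w).getD j 0, (j : Int)) :: ((List.range v.length).erase j).map (fun (i : Nat) => ((v.set j w).getD i 0, (i : Int)))) := by
      simpa [pairsOf, List.length_set] using hperm.map (fun (i : Nat) => ((v.set j w).getD i 0, (i : Int)))
    have h2 : ((List.range v.length).erase j).map (fun (i : Nat) => ((v.set j w).getD i 0, (i : Int)))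
        = ((List.range v.length).erase j).map (fun (i : Nat) => (v.getD i 0, (i : Int))) := by
      refine List.map_congr_left ?_
      intro i hi
      have hne : i ≠ j := ((List.nodup_range).mem_erase_iff.1 hi).1
      simp [List.getD, List.getElem?_set_ne (Ne.symm (by omega : i ≠ j))]
    have h3 : (v.set j w).getD j 0 = w := by simp [List.getD, List.getElem?_set_self hj]
    rw [h3, h2] at h1
    exact h1

lemma root_min {s i : Int} {l r : SkewHeap} (h : (SkewHeap.node s i l r).Ordered) :
    ∀ q ∈ (SkewHeap.node s i l r).toList, keyLE s i q.1 q.2 = true := by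
  intro q hq
  simp only [SkewHeap.toList, List.mem_cons] at hq
  rcases hq with hq | hq
  · subst hq; exact keyLE_refl s i
  · exact h.1 q hq

lemma root_eq_min {v : List Int} {s i : Int} {l r : SkewHeap}
    (hord : (SkewHeap.node s i l r).Ordered)
    (hperm : (SkewHeap.node s i l r).toList.Perm (pairsOf v)) :
    ∃ j : Nat, j < v.length ∧ i = (j : Int) ∧ s = v.getD j 0 ∧
      pyMinKeyByGet (itemsOf v) = (j : Int) := by
  have hmem : (s, i) ∈ pairsOf v := hperm.mem_iff.1 (by simp [SkewHeap.toList])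
  simp only [pairsOf, List.mem_map, List.mem_range] at hmem
  obtain ⟨j, hj, hfi⟩ := hmem
  injection hfi with hs' hi'
  have hs : s = v.getD j 0 := hs'.symm
  have hi : i = (j : Int) := hi'.symm
  -- A's scan
  have hne : itemsOf v ≠ [] := by
    simp only [itemsOf, ne_eq, List.map_eq_nil_iff, List.range_eq_nil]
    omega
  obtain ⟨a, rest, hcons⟩ := List.exists_cons_of_ne_nil hne
  have hsorted : (a :: rest).Pairwise (fun p q : Int × Int => p.1 < q.1) := by
    rw [← hcons]
    simp only [itemsOf]
    refine List.Pairwise.map _ ?_ (List.pairwise_lt_range)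
    intro x y hxy
    simpa using hxy
  obtain ⟨hmem2, hbound2⟩ := foldl_pick_spec rest a hsorted
  set rr := rest.foldl (fun b q => if q.2 < b.2 then q else b) a with hrr
  have hrmem : rr ∈ itemsOf v := by rw [hcons]; exact hmem2
  simp only [itemsOf, List.mem_map, List.mem_range] at hrmem
  obtain ⟨jr, hjr, hfr⟩ := hrmem
  -- rr = (jr, v_jr); compare with the root via both minimality facts
  have hq1 : keyLE rr.2 rr.1 (v.getD j 0) (j : Int) = true := by
    have : ((j : Int), v.getD j 0) ∈ a :: rest := by
      rw [← hcons]; exact List.mem_map.2 ⟨j, List.mem_range.2 hj, rfl⟩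
    simpa using hbound2 _ this
  have hq2 : keyLE s i (v.getD jr 0) (jr : Int) = true := by
    have hmemp : (v.getD jr 0, (jr : Int)) ∈ (SkewHeap.node s i l r).toList :=
      hperm.mem_iff.2 (List.mem_map.2 ⟨jr, List.mem_range.2 hjr, rfl⟩)
    simpa using root_min hord _ hmemp
  have hrval : rr.2 = v.getD jr 0 ∧ rr.1 = (jr : Int) := by
    constructor
    · rw [← hfr]
    · rw [← hfr]
  rw [hrval.1, hrval.2] at hq1
  rw [hs, hi] at hq2
  have heq := keyLE_antisymm hq1 hq2
  have hjj : jr = j := by exact_mod_cast heq.2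
  refine ⟨j, hj, hi, hs, ?_⟩
  have : pyMinKeyByGet (itemsOf v) = rr.1 := by
    rw [hcons]; rfl
  rw [this, hrval.2, hjj]
def StInv (v : List Int) (d : PySem.Dict Int Int) (h : SkewHeap) : Prop :=
  d.items = itemsOf v ∧ h.Ordered ∧ h.toList.Perm (pairsOf v)

lemma step_eq (v : List Int) (d : PySem.Dict Int Int) (h : SkewHeap)
    (S : List (List String)) (sm : Int) (p : String × Int)
    (hinv : StInv v d h) (hpos : 0 < v.length) :
    ∃ v' d' h' S' sm',
      stepA (S, d, sm) p = (S', d', sm') ∧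
      stepB (h, S, v, sm) p = (h', S', v', sm') ∧
      StInv v' d' h' ∧ v'.length = v.length := by
  obtain ⟨hd, hord0, hperm0⟩ := hinv
  cases h with
  | leaf =>
      exfalso
      have : pairsOf v = [] := hperm0.symm.eq_nil
      simp only [pairsOf, List.map_eq_nil_iff, List.range_eq_nil] at this
      omega
  | node s i l r =>
      obtain ⟨j, hj, hi, hs, hmin⟩ := root_eq_min hord0 hperm0
      subst hi
      have hjlen : j < (v.set j (v.getD j 0 + p.2)).length := by simpa using hj
      refine ⟨v.set j (v.getD j 0 + p.2), d.insert (j : Int) (v.getD j 0 + p.2),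
        SkewHeap.merge (SkewHeap.merge l r) (SkewHeap.node (v.getD j 0 + p.2) (j : Int) .leaf .leaf),
        S.set j (PySem.Set.add (S.getD j []) p.1), max sm (v.getD j 0 + p.2), ?_, ?_, ?_, by simp⟩
      · -- A's step
        simp only [stepA, hd, hmin, Int.toNat_natCast]
        rw [getD_of_items hd j hj]
        have hitems' : (d.insert (j : Int) (v.getD j 0 + p.2)).items
            = itemsOf (v.set j (v.getD j 0 + p.2)) := items_insert_of_items hd j hj _
        rw [getD_of_items hitems' j hjlen]
        simp [List.getD, List.getElem?_set_self hj]
      · -- B's step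
        simp only [stepB, Int.toNat_natCast]
        rw [hs]
        have hmax : (if v.getD j 0 + p.2 > sm then v.getD j 0 + p.2 else sm)
            = max sm (v.getD j 0 + p.2) := by
          by_cases hle : v.getD j 0 + p.2 ≤ sm
          · rw [if_neg (by omega), max_eq_left hle]
          · rw [if_pos (by omega), max_eq_right (by omega)]
        rw [hmax]
      · -- invariant
        refine ⟨items_insert_of_items hd j hj _, ?_, ?_⟩
        · refine ordered_merge _ _ (ordered_merge _ _ hord0.2.1 hord0.2.2) ?_
          exact ⟨by simp [SkewHeap.toList], trivial, trivial⟩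
        · obtain ⟨rest, hp1, hp2⟩ := pairsOf_perm v j hj (v.getD j 0 + p.2)
          have hlr : (l.toList ++ r.toList).Perm rest := by
            have := hperm0.trans hp1
            simp only [SkewHeap.toList, hs] at this ⊢
            exact this.cons_inv
          have hsingle : (SkewHeap.node (v.getD j 0 + p.2) (j : Int) .leaf .leaf).toList
              = [(v.getD j 0 + p.2, (j : Int))] := by simp [SkewHeap.toList]
          have t1 := toList_merge (SkewHeap.merge l r)
            (SkewHeap.node (v.getD j 0 + p.2) (j : Int) .leaf .leaf)
          rw [hsingle] at t1
          refine t1.trans ?_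
          refine (((toList_merge l r).append_right _).trans (hlr.append_right _)).trans ?_
          exact (List.perm_append_singleton _ _).trans hp2.symm

lemma loop_eq (m : List (String × Int)) : ∀ (v : List Int) (d : PySem.Dict Int Int)
    (h : SkewHeap) (S : List (List String)) (sm : Int), StInv v d h → 0 < v.length →
    ∃ v' d' h' S' sm',
      m.foldl stepA (S, d, sm) = (S', d', sm') ∧
      m.foldl stepB (h, S, v, sm) = (h', S', v', sm') ∧
      StInv v' d' h' ∧ v'.length = v.length := by
  induction m with
  | nil =>
      intro v d h S sm hinv hpos
      exact ⟨v, d, h, S, sm, rfl, rfl, hinv, rfl⟩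
  | cons p m ih =>
      intro v d h S sm hinv hpos
      obtain ⟨v1, d1, h1, S1, sm1, hA, hB, hinv1, hlen1⟩ := step_eq v d h S sm p hinv hpos
      obtain ⟨v', d', h', S', sm', hA', hB', hinv', hlen'⟩ := ih v1 d1 h1 S1 sm1 hinv1 (by omega)
      exact ⟨v', d', h', S', sm', by rw [List.foldl_cons, hA, hA'], by rw [List.foldl_cons, hB, hB'],
        hinv', by omega⟩
lemma chain_spec (xs : List Int) (hs : xs.Pairwise (· ≤ ·)) :
    (xs.foldr (fun i h => SkewHeap.node 0 i h .leaf) .leaf).Ordered ∧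
    (xs.foldr (fun i h => SkewHeap.node 0 i h .leaf) .leaf).toList
      = xs.map (fun i => ((0 : Int), i)) := by
  induction xs with
  | nil => exact ⟨trivial, rfl⟩
  | cons x xs ih =>
      rw [List.pairwise_cons] at hs
      obtain ⟨hord, htl⟩ := ih hs.2
      refine ⟨⟨?_, hord, trivial⟩, ?_⟩
      · intro q hq
        rw [htl] at hq
        simp only [SkewHeap.toList, List.append_nil, List.mem_map] at hq
        obtain ⟨y, hy, rfl⟩ := hq
        rw [keyLE_iff]
        exact Or.inr ⟨rfl, hs.1 y hy⟩
      · simp only [List.foldr_cons, SkewHeap.toList, htl, List.append_nil, List.map_cons]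

lemma pyRange_of_nonpos {k : Int} (hk : k ≤ 0) : PySem.List.pyRange 0 k 1 = [] := by
  simp [PySem.List.pyRange, show ¬(0 < k) by omega]

lemma pyRange_down_of_nonpos {k : Int} (hk : k ≤ 0) : PySem.List.pyRange (k - 1) (-1) (-1) = [] := by
  simp [PySem.List.pyRange, show ¬((-1 : Int) < k - 1) by omega]

lemma pyRange_down_of_pos {k : Int} (hk : 0 < k) :
    PySem.List.pyRange (k - 1) (-1) (-1) = ((List.range k.toNat).map (fun (i : Nat) => (i : Int))).reverse := by
  rw [PySem.List.pyRange]
  rw [if_neg (by norm_num), if_neg (by norm_num), if_pos (by omega)]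
  have hcount : ((k - 1 - (-1) + -(-1) - 1) / -(-1 : Int)).toNat = k.toNat := by norm_num
  rw [hcount]
  refine List.ext_getElem (by simp) ?_
  intro i h1 h2
  simp only [List.getElem_map, List.getElem_range, List.getElem_reverse, List.length_map,
    List.length_range]
  simp only [List.length_map, List.length_range] at h1 h2
  have : k = (k.toNat : Int) := by omega
  omega

lemma init_inv (k : Int) :
    StInv (List.replicate k.toNat 0)
      ((PySem.List.pyRange 0 k 1).foldl (fun d i => d.insert i 0) PySem.Dict.empty)
      ((PySem.List.pyRange (k - 1) (-1) (-1)).foldl (fun h i => SkewHeap.node 0 i h .leaf) .leaf) := by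
  by_cases hk : 0 < k
  · have hkn : k = (k.toNat : Int) := (Int.toNat_of_nonneg hk.le).symm
    rw [hkn, PySem.List.pyRange_zero_natCast]
    simp only [Int.toNat_natCast]
    have hnodup : (((List.range k.toNat).map (fun (i : Nat) => (i : Int))).map (fun a => a)).Nodup := by
      simp only [List.map_id']
      exact (List.nodup_range).map (fun a b h => by exact_mod_cast h)
    have hitems : (List.foldl (fun d i => d.insert i 0) PySem.Dict.empty
          ((List.range k.toNat).map (fun (i : Nat) => (i : Int)))).items
        = PySem.Dict.empty.items ++ ((List.range k.toNat).map (fun (i : Nat) => (i : Int))).map (fun a => (a, (0 : Int))) :=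
      PySem.Dict.items_foldl_insert_fresh
        ((List.range k.toNat).map (fun (i : Nat) => (i : Int))) (fun a => a) (fun _ => 0)
        PySem.Dict.empty (by intro a _; rfl) hnodup
    refine ⟨?_, ?_, ?_⟩
    · rw [hitems]
      simp only [itemsOf, List.length_replicate, List.map_map]
      have : PySem.Dict.empty.items = ([] : List (Int × Int)) := rfl
      rw [this, List.nil_append]
      refine List.map_congr_left ?_
      intro i hi
      rw [List.mem_range] at hi
      simp
    · rw [pyRange_down_of_pos (show (0 : Int) < ((k.toNat : Nat) : Int) by omega), List.foldl_reverse]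
      simp only [Int.toNat_natCast]
      exact (chain_spec _ ((List.pairwise_lt_range).map _
        (fun a b h => by exact_mod_cast h.le))).1
    · rw [pyRange_down_of_pos (show (0 : Int) < ((k.toNat : Nat) : Int) by omega), List.foldl_reverse]
      simp only [Int.toNat_natCast]
      rw [(chain_spec _ ((List.pairwise_lt_range).map _
        (fun a b h => by exact_mod_cast h.le))).2]
      have : pairsOf (List.replicate k.toNat 0)
          = (List.range k.toNat).map (fun (i : Nat) => ((0 : Int), (i : Int))) := by
        simp only [pairsOf, List.length_replicate]
        refine List.map_congr_left ?_
        intro i hi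
        rw [List.mem_range] at hi
        simp
      rw [this, List.map_map]
      exact List.Perm.refl _
  · have h1 : PySem.List.pyRange 0 k 1 = [] := pyRange_of_nonpos (by omega)
    have h1' : PySem.List.pyRange (k - 1) (-1) (-1) = [] := pyRange_down_of_nonpos (by omega)
    have h2 : k.toNat = 0 := by omega
    rw [h1, h1', h2]
    exact ⟨rfl, trivial, List.Perm.refl _⟩

lemma coef_eq {d : PySem.Dict Int Int} {v : List Int} (hd : d.items = itemsOf v) :
    (d.items.map (fun p => p.2 ^ 2)).sum = (v.map (fun s => s * s)).sum := by
  rw [hd]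
  simp only [itemsOf, List.map_map]
  congr 1
  refine List.ext_getElem (by simp) ?_
  intro i h1 h2
  simp only [List.getElem_map, List.getElem_range, Function.comp_apply]
  rw [List.getD_eq_getElem _ _ (by simpa using h2)]
  ring

-- ===== VERDICT (by name: the statement is the Claim_ definition above) =====
theorem asignacion_greedy_spec : Claim_equal_asignacion_greedy := by
  intro m k _ hpre
  unfold Pre_asignacion_greedy at hpre
  unfold Spec_asignacion_greedy asignacion_greedy asignacion_greedy_alt
  have hinv := init_inv k
  rcases hpre with hm | hk
  · subst hm
    simp only [List.foldl_nil]
    exact Prod.ext rfl (Prod.ext (coef_eq hinv.1) rfl)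
  · have hpos : 0 < (List.replicate k.toNat (0 : Int)).length := by simp; omega
    obtain ⟨v', d', h', S', sm', hA, hB, hinv', _⟩ :=
      loop_eq m (List.replicate k.toNat 0) _ _
        ((PySem.List.pyRange 0 k 1).map (fun _ => ([] : PySem.Set String))) 0 hinv hpos
    simp only [hA, hB]
    exact Prod.ext rfl (Prod.ext (coef_eq hinv'.1) rfl)
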